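-- pv_equiv track=rewrite | github.com/pragnyach22/Multi-Dimensional-Academic-Intelligence-System | day8.py | group_learners
-- ===== SOURCE A (Python) =====
-- def group_learners(records):
--    group_map={
--        "At Risk":[],
--         "Average":[],
--         "Good":[],
--         "Top Performer":[]
--    }
--
--    for entry in records:
--        learner_id, marks, attendance, assignment, performance_index = entry
--
--        if marks<40 or attendance<50:
--            group_map["At Risk"].append(learner_id)
--        elif 40<=marks<=70:
--            group_map["Average"].append(learner_id)
--        elif 71<=marks<=90:
--            group_map["Good"].append(learner_id)
--        elif marks>90 and attendance>80:
--            group_map["Top Performer"].append(learner_id)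
--
--    return group_map
-- ===== SOURCE B (Python) =====
-- def group_learners(records):
--     at_risk = lambda m, a: m < 40 or a < 50
--     return {
--         "At Risk": [e[0] for e in records if at_risk(e[1], e[2])],
--         "Average": [e[0] for e in records if not at_risk(e[1], e[2]) and 40 <= e[1] <= 70],
--         "Good": [e[0] for e in records if not at_risk(e[1], e[2]) and 71 <= e[1] <= 90],
--         "Top Performer": [e[0] for e in records if not at_risk(e[1], e[2]) and e[1] > 90 and e[2] > 80],
--     }
-- ===== Notes on version B (the rewrite author's own statement) =====
-- stated objective: alternative
-- what changed: Replaces the single pass with chained if/elif appends into a mutable dict by four independent filtering comprehensions, one per bucket, each carrying its exclusive predicate explicitly.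
import Mathlib
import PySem

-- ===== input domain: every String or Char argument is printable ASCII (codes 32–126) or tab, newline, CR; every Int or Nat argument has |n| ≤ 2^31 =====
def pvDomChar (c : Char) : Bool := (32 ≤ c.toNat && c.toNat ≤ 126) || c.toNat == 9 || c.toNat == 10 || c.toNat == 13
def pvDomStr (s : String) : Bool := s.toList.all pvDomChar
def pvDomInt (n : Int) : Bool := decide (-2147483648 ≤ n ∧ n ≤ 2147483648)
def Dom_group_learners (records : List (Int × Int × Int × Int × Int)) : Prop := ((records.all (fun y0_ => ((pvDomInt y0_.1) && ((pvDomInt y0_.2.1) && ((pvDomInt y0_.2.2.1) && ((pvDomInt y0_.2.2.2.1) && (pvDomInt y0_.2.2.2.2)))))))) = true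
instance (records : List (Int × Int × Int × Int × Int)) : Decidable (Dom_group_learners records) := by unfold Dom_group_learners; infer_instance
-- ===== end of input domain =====

-- B rebuilds the four buckets with four independent filtering passes (one exclusive predicate each)
-- instead of A's single pass with chained if/elif appends into a mutable dict; same cost, different decomposition.
-- ===== PORT A =====
def group_learners (records : List (Int × Int × Int × Int × Int)) : List (String × List Int) :=
  (records.foldl
    (fun d entry =>
      let learner_id := entry.1
      let marks := entry.2.1
      let attendance := entry.2.2.1
      if marks < 40 || attendance < 50 then
        d.modify "At Risk" [] (· ++ [learner_id])
      else if 40 ≤ marks && marks ≤ 70 then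
        d.modify "Average" [] (· ++ [learner_id])
      else if 71 ≤ marks && marks ≤ 90 then
        d.modify "Good" [] (· ++ [learner_id])
      else if marks > 90 && attendance > 80 then
        d.modify "Top Performer" [] (· ++ [learner_id])
      else d)
    (PySem.Dict.ofList [("At Risk", ([] : List Int)), ("Average", []), ("Good", []), ("Top Performer", [])])).items

-- ===== PORT B =====
def pvAtRisk (m a : Int) : Bool := m < 40 || a < 50

def group_learners_alt (records : List (Int × Int × Int × Int × Int)) : List (String × List Int) :=
  [("At Risk", (records.filter (fun e => pvAtRisk e.2.1 e.2.2.1)).map (·.1)),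
   ("Average", (records.filter (fun e => !pvAtRisk e.2.1 e.2.2.1 && (40 ≤ e.2.1 && e.2.1 ≤ 70))).map (·.1)),
   ("Good", (records.filter (fun e => !pvAtRisk e.2.1 e.2.2.1 && (71 ≤ e.2.1 && e.2.1 ≤ 90))).map (·.1)),
   ("Top Performer", (records.filter (fun e => !pvAtRisk e.2.1 e.2.2.1 && (e.2.1 > 90 && e.2.2.1 > 80))).map (·.1))]

-- ===== PRECONDITION & SPEC =====
def Spec_group_learners (records : List (Int × Int × Int × Int × Int)) (out : List (String × List Int)) : Prop := out = group_learners_alt records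
instance (records : List (Int × Int × Int × Int × Int)) (out : List (String × List Int)) : Decidable (Spec_group_learners records out) := by unfold Spec_group_learners; infer_instance

-- ===== CLAIM (what is proved, stated in full; the proofs are below) =====
def Claim_equal_group_learners : Prop := ∀ (records : List (Int × Int × Int × Int × Int)), Dom_group_learners records → Spec_group_learners records (group_learners records)

-- ===== LEMMAS AND PROOFS =====

-- ===== VERDICT (by name: the statement is the Claim_ definition above) =====
-- proof-side helpers (definitionally equal to the lambda inside group_learners's foldl)
def pvStep (d : PySem.Dict String (List Int)) (entry : Int × Int × Int × Int × Int) :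
    PySem.Dict String (List Int) :=
  let learner_id := entry.1
  let marks := entry.2.1
  let attendance := entry.2.2.1
  if marks < 40 || attendance < 50 then
    d.modify "At Risk" [] (· ++ [learner_id])
  else if 40 ≤ marks && marks ≤ 70 then
    d.modify "Average" [] (· ++ [learner_id])
  else if 71 ≤ marks && marks ≤ 90 then
    d.modify "Good" [] (· ++ [learner_id])
  else if marks > 90 && attendance > 80 then
    d.modify "Top Performer" [] (· ++ [learner_id])
  else d

def pvD (a b c t : List Int) : PySem.Dict String (List Int) :=
  PySem.Dict.mk [("At Risk", a), ("Average", b), ("Good", c), ("Top Performer", t)]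

theorem pvFilters (records : List (Int × Int × Int × Int × Int)) (a b c t : List Int) :
    records.foldl pvStep (pvD a b c t)
    = pvD (a ++ (records.filter (fun e => pvAtRisk e.2.1 e.2.2.1)).map (·.1))
          (b ++ (records.filter (fun e => !pvAtRisk e.2.1 e.2.2.1 && (40 ≤ e.2.1 && e.2.1 ≤ 70))).map (·.1))
          (c ++ (records.filter (fun e => !pvAtRisk e.2.1 e.2.2.1 && (71 ≤ e.2.1 && e.2.1 ≤ 90))).map (·.1))
          (t ++ (records.filter (fun e => !pvAtRisk e.2.1 e.2.2.1 && (e.2.1 > 90 && e.2.2.1 > 80))).map (·.1)) := by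
  induction records generalizing a b c t with
  | nil => simp
  | cons e rest ih =>
    obtain ⟨i, m, at_, x, y⟩ := e
    rw [List.foldl_cons]
    by_cases h1 : (m < 40 || at_ < 50) = true
    · have hstep : pvStep (pvD a b c t) (i, m, at_, x, y) = pvD (a ++ [i]) b c t := by
        simp [pvStep, pvD, PySem.Dict.modify, PySem.Dict.insert, PySem.Dict.getD, PySem.Dict.get?, PySem.Dict.contains, h1]
      rw [hstep, ih]
      simp [pvD, List.filter_cons, pvAtRisk, h1]
      simp only [Bool.or_eq_true, decide_eq_true_eq] at h1
      split_ifs <;> first | rfl | omega | simp_all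
    · by_cases h2 : (40 ≤ m && m ≤ 70) = true
      · have hstep : pvStep (pvD a b c t) (i, m, at_, x, y) = pvD a (b ++ [i]) c t := by
          simp [pvStep, pvD, PySem.Dict.modify, PySem.Dict.insert, PySem.Dict.getD, PySem.Dict.get?, PySem.Dict.contains, h1, h2]
        rw [hstep, ih]
        simp only [Bool.or_eq_true, Bool.and_eq_true, decide_eq_true_eq] at h1 h2
        simp [pvD, List.filter_cons, pvAtRisk]
        split_ifs <;> first | rfl | omega | simp_all
      · by_cases h3 : (71 ≤ m && m ≤ 90) = true
        · have hstep : pvStep (pvD a b c t) (i, m, at_, x, y) = pvD a b (c ++ [i]) t := by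
            simp [pvStep, pvD, PySem.Dict.modify, PySem.Dict.insert, PySem.Dict.getD, PySem.Dict.get?, PySem.Dict.contains, h1, h2, h3]
          rw [hstep, ih]
          simp only [Bool.or_eq_true, Bool.and_eq_true, decide_eq_true_eq] at h1 h2 h3
          simp [pvD, List.filter_cons, pvAtRisk]
          split_ifs <;> first | rfl | omega | simp_all
        · by_cases h4 : (m > 90 && at_ > 80) = true
          · have hstep : pvStep (pvD a b c t) (i, m, at_, x, y) = pvD a b c (t ++ [i]) := by
              simp [pvStep, pvD, PySem.Dict.modify, PySem.Dict.insert, PySem.Dict.getD, PySem.Dict.get?, PySem.Dict.contains, h1, h2, h3, h4]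
            rw [hstep, ih]
            simp only [Bool.or_eq_true, Bool.and_eq_true, decide_eq_true_eq] at h1 h2 h3 h4
            simp [pvD, List.filter_cons, pvAtRisk]
            split_ifs <;> first | rfl | omega | simp_all
          · have hstep : pvStep (pvD a b c t) (i, m, at_, x, y) = pvD a b c t := by
              simp [pvStep, pvD, h1, h2, h3, h4]
            rw [hstep, ih]
            simp only [Bool.or_eq_true, Bool.and_eq_true, decide_eq_true_eq] at h1 h2 h3 h4
            simp [pvD, List.filter_cons, pvAtRisk]
            split_ifs <;> first | rfl | omega | simp_all

theorem group_learners_spec : Claim_equal_group_learners := by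
  intro records _
  show group_learners records = group_learners_alt records
  have h0 : group_learners records = (records.foldl pvStep (pvD [] [] [] [])).items := rfl
  rw [h0, pvFilters]
  simp [pvD, group_learners_alt]
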